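-- pv_equiv track=rewrite | github.com/benquick123/code-profiling | code/batch-1/vse-naloge-brez-testov/DN6-M-195.py | hashtagi
-- ===== SOURCE A (Python) =====
-- def hashtagi(tviti):
--     tviti.sort()
--     tagi = {}
--     for t in tviti:
--         for i in t.split():
--             if i[0] == "#":
--                 i = i.strip("".join([j for j in i if not j.isalnum()]))
--                 tag = tagi.setdefault(i, [])
--                 avtor = t.split(sep=":").pop(0)
--                 if avtor not in tag:
--                     tag.append(avtor)
--     return tagi
-- ===== SOURCE B (Python) =====
-- def _uniq(xs):
--     out = []
--     for x in xs:
--         if x not in out: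
--             out.append(x)
--     return out
--
--
-- def _trim(w):
--     if w and not w[0].isalnum():
--         return _trim(w[1:])
--     if w and not w[-1].isalnum():
--         return _trim(w[:-1])
--     return w
--
--
-- def hashtagi(tviti):
--     tviti.sort()
--     # flat stream of (tag, author) events, in tweet/word order
--     events = [(_trim(w), t.split(":")[0])
--               for t in tviti for w in t.split() if w[0] == "#"]
--     # one output entry per distinct tag (first-occurrence order), authors by
--     # scanning the whole event stream for that tag and deduplicating in order
--     return {tag: _uniq(a for tg, a in events if tg == tag)
--             for tag in _uniq(tg for tg, _ in events)}
-- ===== Notes on version B (the rewrite author's own statement) =====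
-- stated objective: alternative
-- what changed: B never maintains A's dict of growing author lists with an inline membership test: it first flattens the sorted tweets into a (tag, author) event stream, then builds each output entry by rescanning that stream per distinct tag with an order-preserving dedup helper, and trims hashtags by a recursive peel of non-alphanumeric end characters instead of A's strip over a joined character string.
import Mathlib
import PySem

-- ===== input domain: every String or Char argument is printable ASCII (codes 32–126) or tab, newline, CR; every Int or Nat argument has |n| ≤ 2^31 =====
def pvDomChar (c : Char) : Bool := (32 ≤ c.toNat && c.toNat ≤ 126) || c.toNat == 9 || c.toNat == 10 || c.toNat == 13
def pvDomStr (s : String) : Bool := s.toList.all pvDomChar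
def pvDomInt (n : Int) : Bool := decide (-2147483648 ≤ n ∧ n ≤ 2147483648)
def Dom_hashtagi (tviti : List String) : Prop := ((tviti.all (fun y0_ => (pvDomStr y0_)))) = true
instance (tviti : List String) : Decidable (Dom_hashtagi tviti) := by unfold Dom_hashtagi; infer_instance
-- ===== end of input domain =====

-- B drops A's incrementally-maintained dict entirely: it collects a flat (tag, author) event
-- stream, then builds one output entry per distinct tag by rescanning that stream, with an
-- order-preserving dedup helper and a recursive end-trim instead of A's strip; objective:
-- alternative. Like A, B sorts the argument list in place (same mutation); the theorems are
-- about the return value.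

-- ===== PORT A =====
def hashtagi (tviti : List String) : List (String × List String) :=
  let tviti' := PySem.List.sorted tviti (fun x => x) false
  let tagi : PySem.Dict String (List String) :=
    tviti'.foldl (fun tagi t =>
      (PySem.Str.split₀ t).foldl (fun tagi i =>
        if PySem.Str.pyGet? i 0 == some '#' then
          let i' := PySem.Str.stripChars i (String.ofList (i.toList.filter (fun j => !PySem.Chars.isalnum j)))
          let tagi1 := tagi.setdefault i' []
          let tag := tagi1.getD i' []
          let avtor := ((PySem.Str.split? t ":").getD []).headD ""
          if tag.contains avtor then tagi1
          else tagi1.modify i' [] (fun l => l ++ [avtor])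
        else tagi) tagi) PySem.Dict.empty
  tagi.items

-- ===== PORT B =====
-- _uniq: order-preserving dedup by an explicit accumulator loop
def pyUniq {α : Type} [BEq α] (xs : List α) : List α :=
  xs.foldl (fun out x => if out.contains x then out else out ++ [x]) []

-- _trim: recursively peel non-alphanumeric chars off either end
def trimTag (w : String) : String :=
  if (PySem.Str.pyGet? w 0).any (fun c => !PySem.Chars.isalnum c) then
    trimTag (PySem.Str.slice w (some 1) none)
  else if (PySem.Str.pyGet? w (-1)).any (fun c => !PySem.Chars.isalnum c) then
    trimTag (PySem.Str.slice w none (some (-1)))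
  else w
termination_by w.toList.length
decreasing_by
  · rename_i h
    simp only [PySem.Str.pyGet?_eq, PySem.Chars.pyGet?_eq_listPyGet?] at h
    have hne : w.toList ≠ [] := by
      intro hh; rw [hh] at h; simp [PySem.List.pyGet?, PySem.List.pyIdx?] at h
    rw [PySem.Str.toList_slice, PySem.Chars.slice_eq_listSlice, PySem.List.slice_from_one,
      List.length_tail]
    have := List.length_pos_iff.mpr hne
    omega
  · rename_i h
    simp only [PySem.Str.pyGet?_eq, PySem.Chars.pyGet?_eq_listPyGet?] at h
    have hne : w.toList ≠ [] := by
      intro hh; rw [hh] at h; simp [PySem.List.pyGet?, PySem.List.pyIdx?] at h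
    rw [PySem.Str.toList_slice, PySem.Chars.slice_eq_listSlice, PySem.List.slice_to_neg_one,
      List.length_dropLast]
    have := List.length_pos_iff.mpr hne
    omega

def hashtagi_alt (tviti : List String) : List (String × List String) :=
  let tviti' := PySem.List.sorted tviti (fun x => x) false
  let events : List (String × String) :=
    tviti'.flatMap (fun t =>
      ((PySem.Str.split₀ t).filter (fun w => PySem.Str.pyGet? w 0 == some '#')).map
        (fun w => (trimTag w, (PySem.List.pyGet? ((PySem.Str.split? t ":").getD []) 0).getD "")))
  -- the dict comprehension: its keys are the pyUniq'd tags, hence pairwise distinct,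
  -- so the dict's items are exactly this map in key order
  (pyUniq (events.map (fun e => e.1))).map
    (fun tag => (tag, pyUniq ((events.filter (fun e => e.1 == tag)).map (fun e => e.2))))

-- ===== PRECONDITION & SPEC =====
def Spec_hashtagi (tviti : List String) (out : List (String × List String)) : Prop := out = hashtagi_alt tviti
instance (tviti : List String) (out : List (String × List String)) : Decidable (Spec_hashtagi tviti out) := by unfold Spec_hashtagi; infer_instance

-- ===== CLAIM (what is proved, stated in full; the proofs are below) =====
def Claim_equal_hashtagi : Prop := ∀ (tviti : List String), Dom_hashtagi tviti → Spec_hashtagi tviti (hashtagi tviti)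

-- ===== LEMMAS AND PROOFS =====

-- the double-ended trim on char lists that both A's strip expression and B's _trim compute
def pvTrimDW (l : List Char) : List Char :=
  (l.dropWhile (fun c => !PySem.Chars.isalnum c)).rdropWhile (fun c => !PySem.Chars.isalnum c)

def pvAuthor (t : String) : String := ((PySem.Str.split? t ":").getD []).headD ""

def pvEvts (t : String) : List (String × String) :=
  ((PySem.Str.split₀ t).filter (fun i => PySem.Str.pyGet? i 0 == some '#')).map
    (fun i => (trimTag i, pvAuthor t))

def pvStepA (d : PySem.Dict String (List String)) (e : String × String) : PySem.Dict String (List String) :=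
  let d1 := d.setdefault e.1 []
  if (d1.getD e.1 []).contains e.2 then d1 else d1.modify e.1 [] (fun l => l ++ [e.2])

def pvSpec (evs : List (String × String)) : List (String × List String) :=
  (pyUniq (evs.map (fun e => e.1))).map
    (fun tag => (tag, pyUniq ((evs.filter (fun e => e.1 == tag)).map (fun e => e.2))))

theorem pv_author_eq (l : List String) : (PySem.List.pyGet? l 0).getD "" = l.headD "" := by
  cases l <;> simp [PySem.List.pyGet?, PySem.List.pyIdx?]

theorem pv_pyGet0 {α : Type} (l : List α) : PySem.List.pyGet? l 0 = l.head? := by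
  cases l <;> simp [PySem.List.pyGet?, PySem.List.pyIdx?]

theorem pv_pyGetNeg1 {α : Type} (l : List α) : PySem.List.pyGet? l (-1) = l.getLast? := by
  simp only [PySem.List.pyGet?, PySem.List.pyIdx?]
  rcases l with _ | ⟨a, l⟩
  · simp
  · have h1 : ¬ (0:Int) ≤ -1 := by omega
    have h2 : -((a :: l).length : Int) ≤ -1 := by
      have : 0 < (a :: l).length := by simp
      omega
    rw [if_neg h1, if_pos h2]
    simp only [Option.bind_some]
    rw [List.getLast?_eq_getElem?]
    norm_num

theorem pv_dropWhile_of_head (l : List Char)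
    (h1 : l.head?.any (fun c => !PySem.Chars.isalnum c) = false) :
    l.dropWhile (fun c => !PySem.Chars.isalnum c) = l := by
  cases l with
  | nil => rfl
  | cons a r =>
    simp only [List.head?_cons, Option.any_some] at h1
    simp [h1]

theorem pv_trimDW_tail (l : List Char)
    (h : l.head?.any (fun c => !PySem.Chars.isalnum c) = true) :
    pvTrimDW l.tail = pvTrimDW l := by
  cases l with
  | nil => simp at h
  | cons a r =>
    simp only [List.head?_cons, Option.any_some] at h
    simp [pvTrimDW, h]

theorem pv_trimDW_dropLast (l : List Char)
    (h1 : l.head?.any (fun c => !PySem.Chars.isalnum c) = false)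
    (h2 : l.getLast?.any (fun c => !PySem.Chars.isalnum c) = true) :
    pvTrimDW l.dropLast = pvTrimDW l := by
  have hne : l ≠ [] := by rintro rfl; simp at h2
  have hq : (fun c => !PySem.Chars.isalnum c) (l.getLast hne) = true := by
    rw [List.getLast?_eq_some_getLast hne] at h2
    simpa using h2
  have hsplit : l.dropLast ++ [l.getLast hne] = l := List.dropLast_append_getLast hne
  have hr : l.rdropWhile (fun c => !PySem.Chars.isalnum c)
      = (l.dropLast).rdropWhile (fun c => !PySem.Chars.isalnum c) := by
    have h0 := List.rdropWhile_concat_pos (p := fun c => !PySem.Chars.isalnum c)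
      (l := l.dropLast) (l.getLast hne) hq
    rw [hsplit] at h0
    exact h0
  have hdl : l.dropLast.dropWhile (fun c => !PySem.Chars.isalnum c) = l.dropLast := by
    apply pv_dropWhile_of_head
    cases hdl : l.dropLast with
    | nil => simp
    | cons b r =>
      have : l.head? = some b := by
        conv_lhs => rw [← hsplit]
        rw [hdl]
        rfl
      rw [this] at h1
      simp only [List.head?_cons]
      exact h1
  rw [pvTrimDW, pvTrimDW, hdl, pv_dropWhile_of_head l h1, hr]

theorem pv_trimDW_self (l : List Char)
    (h1 : l.head?.any (fun c => !PySem.Chars.isalnum c) = false)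
    (h2 : l.getLast?.any (fun c => !PySem.Chars.isalnum c) = false) :
    pvTrimDW l = l := by
  rw [pvTrimDW, pv_dropWhile_of_head l h1]
  rw [List.rdropWhile_eq_self_iff]
  intro hl hcontra
  rw [List.getLast?_eq_some_getLast hl] at h2
  simp only [Option.any_some] at h2
  rw [h2] at hcontra
  cases hcontra

theorem pv_trim_eq_trimDW (w : String) : trimTag w = String.ofList (pvTrimDW w.toList) := by
  induction w using trimTag.induct with
  | case1 w h ih =>
    rw [trimTag, if_pos h]
    rw [ih]
    simp only [PySem.Str.pyGet?_eq, PySem.Chars.pyGet?_eq_listPyGet?, pv_pyGet0] at h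
    rw [PySem.Str.toList_slice, PySem.Chars.slice_eq_listSlice, PySem.List.slice_from_one,
      pv_trimDW_tail w.toList h]
  | case2 w h1 h2 ih =>
    rw [trimTag, if_neg h1, if_pos h2]
    rw [ih]
    have h1' : w.toList.head?.any (fun c => !PySem.Chars.isalnum c) = false := by
      simp only [PySem.Str.pyGet?_eq, PySem.Chars.pyGet?_eq_listPyGet?, pv_pyGet0] at h1
      exact Bool.eq_false_iff.mpr h1
    simp only [PySem.Str.pyGet?_eq, PySem.Chars.pyGet?_eq_listPyGet?, pv_pyGetNeg1] at h2
    rw [PySem.Str.toList_slice, PySem.Chars.slice_eq_listSlice, PySem.List.slice_to_neg_one,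
      pv_trimDW_dropLast w.toList h1' h2]
  | case3 w h1 h2 =>
    rw [trimTag, if_neg h1, if_neg h2]
    have h1' : w.toList.head?.any (fun c => !PySem.Chars.isalnum c) = false := by
      simp only [PySem.Str.pyGet?_eq, PySem.Chars.pyGet?_eq_listPyGet?, pv_pyGet0] at h1
      exact Bool.eq_false_iff.mpr h1
    have h2' : w.toList.getLast?.any (fun c => !PySem.Chars.isalnum c) = false := by
      simp only [PySem.Str.pyGet?_eq, PySem.Chars.pyGet?_eq_listPyGet?, pv_pyGetNeg1] at h2
      exact Bool.eq_false_iff.mpr h2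
    rw [pv_trimDW_self w.toList h1' h2']
    simp

theorem pv_dw_congr {α : Type} (P Q : α → Bool) (l : List α) (h : ∀ c ∈ l, P c = Q c) :
    l.dropWhile P = l.dropWhile Q := by
  induction l with
  | nil => rfl
  | cons a l ih =>
    have ha := h a (by simp)
    simp only [List.dropWhile_cons, ha]
    split
    · exact ih (fun c hc => h c (by simp [hc]))
    · rfl

-- A's i.strip(join of the non-alnum chars of i) is exactly the double-ended non-alnum trim
theorem pv_strip_eq_DW (i : String) :
    PySem.Str.stripChars i (String.ofList (i.toList.filter (fun j => !PySem.Chars.isalnum j)))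
      = String.ofList (pvTrimDW i.toList) := by
  have hinj : ∀ s t : String, s.toList = t.toList → s = t := by
    intro s t h; have := congrArg String.ofList h; simpa using this
  apply hinj
  rw [PySem.Str.toList_stripChars]
  simp only [pvTrimDW, String.toList_ofList]
  rw [List.rdropWhile]
  show (List.dropWhile (fun c => (i.toList.filter (fun j => !PySem.Chars.isalnum j)).contains c)
      ((List.dropWhile (fun c => (i.toList.filter (fun j => !PySem.Chars.isalnum j)).contains c) i.toList)).reverse).reverse
      = (List.dropWhile (fun c => !PySem.Chars.isalnum c)
      ((List.dropWhile (fun c => !PySem.Chars.isalnum c) i.toList)).reverse).reverse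
  have hcong : ∀ (l : List Char), (∀ c ∈ l, c ∈ i.toList) →
      l.dropWhile (fun c => (i.toList.filter (fun j => !PySem.Chars.isalnum j)).contains c)
        = l.dropWhile (fun c => !PySem.Chars.isalnum c) := by
    intro l hl
    apply pv_dw_congr
    intro c hc
    have hci := hl c hc
    by_cases h : PySem.Chars.isalnum c = true <;> simp [h, hci]
  rw [hcong i.toList (fun c hc => hc)]
  congr 1
  apply hcong
  intro c hc
  exact (List.dropWhile_sublist _).mem (List.mem_reverse.mp hc)

theorem pv_strip_eq (i : String) :
    PySem.Str.stripChars i (String.ofList (i.toList.filter (fun j => !PySem.Chars.isalnum j))) = trimTag i := by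
  rw [pv_strip_eq_DW, pv_trim_eq_trimDW]

-- pyUniq basics
theorem pv_mem_foldl_uniq {α : Type} [BEq α] [LawfulBEq α] (l : List α) (acc : List α) (x : α) :
    x ∈ l.foldl (fun out x => if out.contains x then out else out ++ [x]) acc ↔ x ∈ acc ∨ x ∈ l := by
  induction l generalizing acc with
  | nil => simp
  | cons a l ih =>
    simp only [List.foldl_cons]
    by_cases h : acc.contains a
    · rw [if_pos h]
      rw [ih]
      constructor
      · rintro (hx | hx) <;> simp [hx]
      · rintro (hx | hx)
        · exact Or.inl hx
        · rcases List.mem_cons.mp hx with rfl | hx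
          · exact Or.inl (by simpa using h)
          · exact Or.inr hx
    · rw [if_neg h, ih]
      simp only [List.mem_append, List.mem_cons]
      tauto
theorem pv_mem_pyUniq {α : Type} [BEq α] [LawfulBEq α] (l : List α) (x : α) :
    x ∈ pyUniq l ↔ x ∈ l := by
  unfold pyUniq; rw [pv_mem_foldl_uniq]; simp
theorem pv_nodup_foldl_uniq {α : Type} [BEq α] [LawfulBEq α] (l : List α) (acc : List α)
    (hacc : acc.Nodup) : (l.foldl (fun out x => if out.contains x then out else out ++ [x]) acc).Nodup := by
  induction l generalizing acc with
  | nil => exact hacc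
  | cons a l ih =>
    simp only [List.foldl_cons]
    by_cases h : acc.contains a
    · rw [if_pos h]; exact ih _ hacc
    · rw [if_neg h]
      refine ih _ ?_
      simp only [List.nodup_append, List.nodup_singleton, hacc, true_and]
      intro b hb c hc
      rcases List.mem_singleton.mp hc with rfl
      intro hba
      subst hba
      exact h (by simpa using hb)
theorem pv_nodup_pyUniq {α : Type} [BEq α] [LawfulBEq α] (l : List α) : (pyUniq l).Nodup :=
  pv_nodup_foldl_uniq l [] List.nodup_nil

theorem pv_pyUniq_append {α : Type} [BEq α] [LawfulBEq α] (l : List α) (x : α) :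
    pyUniq (l ++ [x]) = if (pyUniq l).contains x then pyUniq l else pyUniq l ++ [x] := by
  simp [pyUniq, List.foldl_append]

theorem pv_map_fst_pair {β : Type} (g : String → β) (l : List String) :
    List.map ((fun x => x.1) ∘ fun tag => ((tag : String), g tag)) l = l := by
  induction l with
  | nil => rfl
  | cons a l ih => simp [ih]

-- one A-step on a table that already equals B's rescan of evs yields B's rescan of evs ++ [e]
theorem pv_step (evs : List (String × String)) (e : String × String)
    (d : PySem.Dict String (List String)) (h : d.items = pvSpec evs) :
    (pvStepA d e).items = pvSpec (evs ++ [e]) := by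
  have hkeys : d.keys = pyUniq (evs.map (fun e => e.1)) := by
    simp only [PySem.Dict.keys, h, pvSpec, List.map_map]
    exact pv_map_fst_pair _ _
  have hnodup : d.keys.Nodup := by rw [hkeys]; exact pv_nodup_pyUniq _
  have hmapfst : (evs ++ [e]).map (fun e => e.1) = evs.map (fun e => e.1) ++ [e.1] := by
    simp
  by_cases hc : e.1 ∈ evs.map (fun e => e.1)
  · -- the tag is already a key
    have hmemu : e.1 ∈ pyUniq (evs.map (fun e => e.1)) := (pv_mem_pyUniq _ _).mpr hc
    have hcont : d.contains e.1 = true := by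
      rw [PySem.Dict.contains_eq_decide_mem_keys, hkeys]
      simpa using hmemu
    have htagsu : pyUniq ((evs ++ [e]).map (fun e => e.1)) = pyUniq (evs.map (fun e => e.1)) := by
      rw [hmapfst, pv_pyUniq_append, if_pos (by simpa using hmemu)]
    have hval : d.getD e.1 [] = pyUniq ((evs.filter (fun q => q.1 == e.1)).map (fun q => q.2)) := by
      apply PySem.Dict.getD_of_mem_items _ _ hnodup
      rw [h, pvSpec]
      exact List.mem_map.mpr ⟨e.1, hmemu, rfl⟩
    have hfilt : ∀ tag : String, (evs ++ [e]).filter (fun q => q.1 == tag)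
        = evs.filter (fun q => q.1 == tag) ++ (if e.1 == tag then [e] else []) := by
      intro tag
      rw [List.filter_append]
      congr 1
      cases hbt : (e.1 == tag) <;> simp [hbt]
    by_cases hm : e.2 ∈ (evs.filter (fun q => q.1 == e.1)).map (fun q => q.2)
    · -- author already recorded for this tag: A leaves the table alone
      have hbc : (d.getD e.1 []).contains e.2 = true := by
        rw [hval]; simpa using (pv_mem_pyUniq _ _).mpr hm
      unfold pvStepA
      rw [PySem.Dict.setdefault_of_contains d (v := []) hcont]
      simp only [hbc, if_true]
      rw [h, pvSpec, pvSpec, htagsu]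
      apply List.map_congr_left
      intro tag htag
      by_cases ht : e.1 = tag
      · subst ht
        rw [hfilt, if_pos (by simp)]
        simp only [List.map_append, List.map_cons, List.map_nil]
        rw [pv_pyUniq_append, if_pos (by simpa using (pv_mem_pyUniq _ _).mpr hm)]
      · rw [hfilt, if_neg (by simpa using ht)]
        simp
    · -- new author for an existing tag: A appends, B's rescan picks it up at the end
      have hnc : (pyUniq ((evs.filter (fun q => q.1 == e.1)).map (fun q => q.2))).contains e.2
          = false := by
        rw [Bool.eq_false_iff]
        intro hcontra
        exact hm ((pv_mem_pyUniq _ _).mp (by simpa using hcontra))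
      have hbc : (d.getD e.1 []).contains e.2 = false := by rw [hval]; exact hnc
      unfold pvStepA
      rw [PySem.Dict.setdefault_of_contains d (v := []) hcont]
      simp only [hbc, Bool.false_eq_true, if_false]
      simp only [PySem.Dict.modify, hval]
      rw [PySem.Dict.items_insert_of_contains d _ hcont, h, pvSpec, pvSpec, htagsu,
        List.map_map]
      apply List.map_congr_left
      intro tag htag
      by_cases ht : e.1 = tag
      · subst ht
        rw [hfilt, if_pos (by simp)]
        simp only [Function.comp, List.map_append, List.map_cons, List.map_nil]
        have heq : pyUniq ((List.filter (fun q => q.1 == e.1) evs).map (fun q => q.2) ++ [e.2])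
            = pyUniq ((List.filter (fun q => q.1 == e.1) evs).map (fun q => q.2)) ++ [e.2] := by
          rw [pv_pyUniq_append, if_neg]
          intro hx
          rw [hnc] at hx
          cases hx
        rw [heq]
        simp
      · rw [hfilt, if_neg (by simpa using ht)]
        have : (tag == e.1) = false := by simpa using fun hh => ht hh.symm
        simp [Function.comp, this]
  · -- fresh tag: A inserts a one-author entry, B's rescan appends it at the back
    have hmemu : e.1 ∉ pyUniq (evs.map (fun e => e.1)) := fun hx => hc ((pv_mem_pyUniq _ _).mp hx)
    have hcont : d.contains e.1 = false := by
      rw [PySem.Dict.contains_eq_decide_mem_keys, hkeys]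
      simpa using hmemu
    unfold pvStepA
    rw [PySem.Dict.setdefault_of_not_contains d (v := []) hcont]
    simp only [PySem.Dict.getD_insert_self]
    rw [if_neg (by simp)]
    simp only [PySem.Dict.modify, PySem.Dict.getD_insert_self]
    rw [PySem.Dict.insert_insert_self]
    simp only [List.nil_append]
    rw [PySem.Dict.items_insert_of_not_contains d _ hcont, h, pvSpec, pvSpec, hmapfst,
      pv_pyUniq_append, if_neg (by simpa using hmemu), List.map_append]
    congr 1
    · apply List.map_congr_left
      intro tag htag
      have ht : e.1 ≠ tag := fun hh => hc (hh ▸ ((pv_mem_pyUniq _ _).mp htag))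
      rw [List.filter_append]
      have hbt : (e.1 == tag) = false := by simpa using ht
      have hfe : List.filter (fun q => q.1 == tag) [e] = [] := by
        simp [hbt]
      simp [hfe]
    · have hnil : evs.filter (fun q => q.1 == e.1) = [] := by
        rw [List.filter_eq_nil_iff]
        intro q hq
        simp only [beq_iff_eq]
        intro hh
        exact hc (List.mem_map.mpr ⟨q, hq, hh⟩)
      simp only [List.map_cons, List.map_nil]
      rw [List.filter_append, hnil]
      have hfe : List.filter (fun q => q.1 == e.1) [e] = [e] := by
        simp
      rw [hfe]
      simp [pyUniq]

-- the core: folding A's step over the event stream produces exactly B's rescanned table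
theorem pv_core (evs : List (String × String)) :
    (evs.foldl pvStepA PySem.Dict.empty).items = pvSpec evs := by
  induction evs using List.reverseRecOn with
  | nil => simp [pvSpec, pyUniq, PySem.Dict.empty]
  | append_singleton evs e ih =>
    rw [List.foldl_append, List.foldl_cons, List.foldl_nil]
    exact pv_step evs e _ ih

theorem pv_foldl_if_filterMap {α β σ : Type} (p : α → Bool) (f : α → β) (step : σ → β → σ)
    (l : List α) (s : σ) :
    l.foldl (fun s x => if p x then step s (f x) else s) s = ((l.filter p).map f).foldl step s := by
  induction l generalizing s with
  | nil => rfl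
  | cons a l ih => by_cases h : p a <;> simp [h, ih]

theorem pv_foldl_flat {α β σ : Type} (g : α → List β) (step : σ → β → σ) (l : List α) (s : σ) :
    l.foldl (fun s t => (g t).foldl step s) s = (l.flatMap g).foldl step s := by
  induction l generalizing s with
  | nil => rfl
  | cons a l ih => simp [List.flatMap_cons, List.foldl_append, ih]

theorem pv_inner_eqA (t : String) (d : PySem.Dict String (List String)) :
    (PySem.Str.split₀ t).foldl (fun tagi i =>
      if PySem.Str.pyGet? i 0 == some '#' then
        let i' := PySem.Str.stripChars i (String.ofList (i.toList.filter (fun j => !PySem.Chars.isalnum j)))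
        let tagi1 := tagi.setdefault i' []
        let tag := tagi1.getD i' []
        let avtor := ((PySem.Str.split? t ":").getD []).headD ""
        if tag.contains avtor then tagi1
        else tagi1.modify i' [] (fun l => l ++ [avtor])
      else tagi) d
    = (pvEvts t).foldl pvStepA d := by
  have hstep : (fun (tagi : PySem.Dict String (List String)) (i : String) =>
      if PySem.Str.pyGet? i 0 == some '#' then
        let i' := PySem.Str.stripChars i (String.ofList (i.toList.filter (fun j => !PySem.Chars.isalnum j)))
        let tagi1 := tagi.setdefault i' []
        let tag := tagi1.getD i' []
        let avtor := ((PySem.Str.split? t ":").getD []).headD ""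
        if tag.contains avtor then tagi1
        else tagi1.modify i' [] (fun l => l ++ [avtor])
      else tagi)
      = (fun tagi i => if PySem.Str.pyGet? i 0 == some '#' then
          pvStepA tagi (trimTag i, pvAuthor t) else tagi) := by
    funext tagi i
    simp only [pv_strip_eq]
    rfl
  rw [hstep]
  exact pv_foldl_if_filterMap _ _ _ _ _

theorem pv_hashtagi_eq (tviti : List String) :
    hashtagi tviti =
      (((PySem.List.sorted tviti (fun x => x) false).flatMap pvEvts).foldl pvStepA PySem.Dict.empty).items := by
  unfold hashtagi
  simp only [pv_inner_eqA, pv_foldl_flat]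

theorem pv_hashtagi_alt_eq (tviti : List String) :
    hashtagi_alt tviti = pvSpec ((PySem.List.sorted tviti (fun x => x) false).flatMap pvEvts) := by
  unfold hashtagi_alt pvSpec pvEvts pvAuthor
  simp only [pv_author_eq]

-- ===== VERDICT (by name: the statement is the Claim_ definition above) =====
theorem hashtagi_spec : Claim_equal_hashtagi := by
  intro tviti _
  unfold Spec_hashtagi
  rw [pv_hashtagi_eq, pv_hashtagi_alt_eq, pv_core]
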